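-- pv_equiv track=rewrite | github.com/millystuart/tetris | tetrimino.py | coords_with_smallest_x
-- ===== SOURCE A (Python) =====
-- def coords_with_smallest_x(coords, y_coords):
--       smallest_coords = []
--
--       for i in range(0, len(y_coords)):
--             smallest_coord = (11, 11, 11)
--             for j in range(0, len(coords)):
--                   if coords[j][1] == y_coords[i] and coords[j][0] < smallest_coord[0]:
--                         smallest_coord = coords[j]
--             smallest_coords.append(smallest_coord)
--
--       return smallest_coords
-- ===== SOURCE B (Python) =====
-- def coords_with_smallest_x(coords, y_coords):
--       # One pass over coords: keep, per y value, the coord with smallest x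
--       # (strict comparison vs the (11,11,11) sentinel keeps the earliest on ties
--       # and ignores coords with x >= 11, exactly like A). Then map y_coords.
--       best = {}
--       for c in coords:
--             if c[0] < best.get(c[1], (11, 11, 11))[0]:
--                   best[c[1]] = c
--       return [best.get(y, (11, 11, 11)) for y in y_coords]
-- ===== Notes on version B (the rewrite author's own statement) =====
-- stated objective: faster
-- what changed: Replaces the nested rescan of coords for every y with a single pass that builds a dict of the per-y minimum-x coord, then maps each y to a dict lookup.
import Mathlib
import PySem

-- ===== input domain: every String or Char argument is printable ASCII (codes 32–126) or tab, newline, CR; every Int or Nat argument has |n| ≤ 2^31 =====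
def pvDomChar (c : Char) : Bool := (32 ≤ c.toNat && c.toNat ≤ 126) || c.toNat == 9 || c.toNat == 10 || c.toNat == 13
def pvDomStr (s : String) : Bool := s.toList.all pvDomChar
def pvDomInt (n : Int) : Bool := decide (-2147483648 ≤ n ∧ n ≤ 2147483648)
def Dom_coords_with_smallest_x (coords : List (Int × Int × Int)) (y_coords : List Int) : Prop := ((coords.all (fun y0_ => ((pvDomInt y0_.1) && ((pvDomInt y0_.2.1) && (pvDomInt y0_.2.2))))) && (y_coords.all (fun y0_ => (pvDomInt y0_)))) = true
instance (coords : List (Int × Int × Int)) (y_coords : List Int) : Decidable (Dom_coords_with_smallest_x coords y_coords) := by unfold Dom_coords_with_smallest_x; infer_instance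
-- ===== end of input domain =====

-- B replaces A's nested rescans by one dict-building pass over coords plus a lookup per y (asymptotically faster).


-- ===== PORT A =====
-- Literal port: outer loop over range(0, len(y_coords)), inner loop over range(0, len(coords))
-- rescanning coords with indexing, appending each smallest_coord.
def coords_with_smallest_x (coords : List (Int × Int × Int)) (y_coords : List Int) : List (Int × Int × Int) :=
  (PySem.List.pyRange 0 (PySem.List.len y_coords) 1).foldl (fun smallest_coords i =>
    let smallest_coord :=
      (PySem.List.pyRange 0 (PySem.List.len coords) 1).foldl (fun smallest_coord j =>
        let c := PySem.List.pyGetD coords j (0, 0, 0)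
        if c.2.1 == PySem.List.pyGetD y_coords i 0 && decide (c.1 < smallest_coord.1) then c
        else smallest_coord) (11, 11, 11)
    smallest_coords ++ [smallest_coord]) []

-- ===== PORT B =====
-- Port of Source B: one fold over coords building the per-y best dict, then a map over y_coords.
def coords_with_smallest_x_alt (coords : List (Int × Int × Int)) (y_coords : List Int) : List (Int × Int × Int) :=
  let best := coords.foldl (fun best c =>
    if c.1 < (best.getD c.2.1 (11, 11, 11)).1 then best.insert c.2.1 c else best)
    (PySem.Dict.empty : PySem.Dict Int (Int × Int × Int))
  y_coords.map (fun y => best.getD y (11, 11, 11))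

-- ===== PRECONDITION & SPEC =====
def Spec_coords_with_smallest_x (coords : List (Int × Int × Int)) (y_coords : List Int) (out : List (Int × Int × Int)) : Prop := out = coords_with_smallest_x_alt coords y_coords
instance (coords : List (Int × Int × Int)) (y_coords : List Int) (out : List (Int × Int × Int)) : Decidable (Spec_coords_with_smallest_x coords y_coords out) := by unfold Spec_coords_with_smallest_x; infer_instance

-- ===== CLAIM (what is proved, stated in full; the proofs are below) =====
def Claim_equal_coords_with_smallest_x : Prop := ∀ (coords : List (Int × Int × Int)) (y_coords : List Int), Dom_coords_with_smallest_x coords y_coords → Spec_coords_with_smallest_x coords y_coords (coords_with_smallest_x coords y_coords)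

-- ===== LEMMAS AND PROOFS =====

-- A's inner loop for a fixed y, as a fold over the coord list itself.
def innerA (coords : List (Int × Int × Int)) (y : Int) (acc : Int × Int × Int) : Int × Int × Int :=
  coords.foldl (fun sc c => if c.2.1 == y && decide (c.1 < sc.1) then c else sc) acc

-- B's dict-building step.
def bstep (best : PySem.Dict Int (Int × Int × Int)) (c : Int × Int × Int) : PySem.Dict Int (Int × Int × Int) :=
  if c.1 < (best.getD c.2.1 (11, 11, 11)).1 then best.insert c.2.1 c else best

-- Key invariant: looking up y in the dict built by B's fold equals A's inner fold started
-- from the current lookup.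
theorem getD_foldl_bstep (coords : List (Int × Int × Int)) (d : PySem.Dict Int (Int × Int × Int)) (y : Int) :
    (coords.foldl bstep d).getD y (11, 11, 11) = innerA coords y (d.getD y (11, 11, 11)) := by
  induction coords generalizing d with
  | nil => simp [innerA]
  | cons c cs ih =>
      simp only [List.foldl_cons, innerA] at *
      rw [ih]
      congr 1
      unfold bstep
      by_cases hy : c.2.1 = y
      · subst hy
        by_cases h : c.1 < (d.getD c.2.1 (11, 11, 11)).1
        · simp [h]
        · simp [h]
      · by_cases h : c.1 < (d.getD c.2.1 (11, 11, 11)).1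
        · simp [h, PySem.Dict.getD_insert, hy, Ne.symm hy]
        · simp [h, hy]

-- ===== VERDICT (by name: the statement is the Claim_ definition above) =====
theorem coords_with_smallest_x_spec : Claim_equal_coords_with_smallest_x := by
  intro coords y_coords _
  unfold Spec_coords_with_smallest_x coords_with_smallest_x coords_with_smallest_x_alt
  -- reduce A's index loops to folds/maps over the lists themselves
  simp only [PySem.List.len_eq]
  rw [PySem.List.foldl_append_singleton_eq_map]
  have hinner : ∀ i : Int,
      (PySem.List.pyRange 0 (coords.length : Int) 1).foldl (fun sc j =>
        let c := PySem.List.pyGetD coords j (0, 0, 0)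
        if c.2.1 == PySem.List.pyGetD y_coords i 0 && decide (c.1 < sc.1) then c else sc) (11, 11, 11)
      = innerA coords (PySem.List.pyGetD y_coords i 0) (11, 11, 11) := by
    intro i
    exact PySem.List.foldl_pyRange_zero_pyGetD' coords (0, 0, 0)
      (fun sc c => if c.2.1 == PySem.List.pyGetD y_coords i 0 && decide (c.1 < sc.1) then c else sc)
      (11, 11, 11)
  simp only [hinner]
  have hmap : (PySem.List.pyRange 0 (y_coords.length : Int) 1).map
      (fun i => innerA coords (PySem.List.pyGetD y_coords i 0) (11, 11, 11))
      = y_coords.map (fun y => innerA coords y (11, 11, 11)) := by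
    have := PySem.List.map_pyGetD_pyRange_zero' y_coords (0 : Int)
    calc (PySem.List.pyRange 0 (y_coords.length : Int) 1).map
          (fun i => innerA coords (PySem.List.pyGetD y_coords i 0) (11, 11, 11))
        = ((PySem.List.pyRange 0 (y_coords.length : Int) 1).map
            (fun i => PySem.List.pyGetD y_coords i 0)).map
            (fun y => innerA coords y (11, 11, 11)) := by rw [List.map_map]; rfl
      _ = y_coords.map (fun y => innerA coords y (11, 11, 11)) := by rw [this]
  rw [hmap]
  simp only [List.nil_append]
  apply List.map_congr_left
  intro y _
  have := getD_foldl_bstep coords PySem.Dict.empty y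
  simp [PySem.Dict.getD_empty] at this
  rw [show (fun best c => if c.1 < (PySem.Dict.getD best c.2.1 (11,11,11)).1 then best.insert c.2.1 c else best) = bstep from rfl]
  exact this.symm
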